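-- pv_equiv track=rewrite | github.com/reshinto/social-research-probe | social_research_probe/utils/narratives/clusterer.py | _resolve_cluster_type
-- ===== SOURCE A (Python) =====
-- from collections import Counter
--
-- _TYPE_MAP: dict[str, str] = {
--     "fact_claim": "theme",
--     "opinion": "theme",
--     "prediction": "prediction",
--     "recommendation": "opportunity",
--     "experience": "theme",
--     "question": "question",
--     "objection": "objection",
--     "pain_point": "pain_point",
--     "market_signal": "market_signal",
-- }
--
-- def _resolve_cluster_type(claims: list[dict]) -> str:
--     """Majority vote on claim_type mapped to cluster_type."""
--     if not claims:
--         return "mixed"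
--     mapped = [_TYPE_MAP.get(c.get("claim_type", ""), "theme") for c in claims]
--     counter = Counter(mapped)
--     top = counter.most_common(2)
--     if len(top) >= 2 and top[0][1] == top[1][1]:
--         return "mixed"
--     return top[0][0]
-- ===== SOURCE B (Python) =====
-- _TYPE_MAP: dict[str, str] = {
--     "fact_claim": "theme",
--     "opinion": "theme",
--     "prediction": "prediction",
--     "recommendation": "opportunity",
--     "experience": "theme",
--     "question": "question",
--     "objection": "objection",
--     "pain_point": "pain_point",
--     "market_signal": "market_signal",
-- }
--
-- def _resolve_cluster_type(claims: list[dict]) -> str: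
--     """Majority vote on claim_type mapped to cluster_type."""
--     if not claims:
--         return "mixed"
--     rest = [_TYPE_MAP.get(c.get("claim_type", ""), "theme") for c in claims]
--     best, best_n, tie = "", 0, False
--     while rest:
--         v = rest[0]
--         n = rest.count(v)
--         rest = [x for x in rest if x != v]
--         if n > best_n:
--             best, best_n, tie = v, n, False
--         elif n == best_n:
--             tie = True
--     return "mixed" if tie else best
-- ===== Notes on version B (the rewrite author's own statement) =====
-- stated objective: alternative
-- what changed: Replaces the Counter + most_common(2) top-two comparison by a select-count-and-remove loop: repeatedly take the first remaining mapped type, count its occurrences, drop all of them from the work list, and keep a running (best, best_count, tie) accumulator; no count table and no sort is ever built.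
import Mathlib
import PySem

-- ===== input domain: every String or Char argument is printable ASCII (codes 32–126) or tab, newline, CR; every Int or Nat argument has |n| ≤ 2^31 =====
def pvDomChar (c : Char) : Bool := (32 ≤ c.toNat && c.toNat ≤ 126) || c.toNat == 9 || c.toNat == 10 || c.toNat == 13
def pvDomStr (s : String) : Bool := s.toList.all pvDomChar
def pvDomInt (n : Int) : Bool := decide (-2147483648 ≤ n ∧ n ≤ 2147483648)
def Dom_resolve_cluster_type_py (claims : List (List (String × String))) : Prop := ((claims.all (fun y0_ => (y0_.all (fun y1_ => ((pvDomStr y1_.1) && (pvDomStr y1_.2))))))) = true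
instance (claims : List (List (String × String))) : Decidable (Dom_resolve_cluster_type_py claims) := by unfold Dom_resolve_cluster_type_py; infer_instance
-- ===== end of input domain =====

-- B replaces Counter + most_common(2) by a select-count-and-remove loop over the mapped
-- list with a running (best, best_count, tie) accumulator: no count table, no sort.

-- ===== PORT A =====
-- module constant _TYPE_MAP (shared by both Pythons)
def pvTypeMap : PySem.Dict String String :=
  PySem.Dict.ofList [("fact_claim", "theme"), ("opinion", "theme"), ("prediction", "prediction"),
    ("recommendation", "opportunity"), ("experience", "theme"), ("question", "question"),
    ("objection", "objection"), ("pain_point", "pain_point"), ("market_signal", "market_signal")]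

-- _TYPE_MAP.get(c.get("claim_type", ""), "theme")  (shared subexpression of both Pythons)
def pvMapClaim (c : List (String × String)) : String :=
  pvTypeMap.getD ((PySem.Dict.mk c).getD "claim_type" "") "theme"

def resolve_cluster_type_py (claims : List (List (String × String))) : String :=
  if claims = [] then "mixed"
  else
    let mapped := claims.map pvMapClaim
    let counter := PySem.Dict.counter mapped
    -- counter.most_common(2) = sorted(counter.items(), key=count, reverse=True)[:2]
    let top := (PySem.List.sorted counter.items (fun p => p.2) true).take 2
    match top with
    | (k0, v0) :: (_, v1) :: _ => if v0 = v1 then "mixed" else k0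
    | (k0, _) :: [] => k0
    | [] => ""   -- unreachable: claims ≠ [] so the counter is nonempty

-- ===== PORT B =====
-- the while-loop of Source B: rest is consumed one distinct value at a time
def pvBLoop : List String → String → Int → Bool → String
  | [], best, _, tie => if tie then "mixed" else best
  | v :: rest, best, best_n, tie =>
    let n : Int := (PySem.List.count (v :: rest) v : Nat)
    let rest' := (v :: rest).filter (fun x => x != v)
    if best_n < n then pvBLoop rest' v n false
    else if n = best_n then pvBLoop rest' best best_n true
    else pvBLoop rest' best best_n tie
termination_by l _ _ _ => l.length
decreasing_by all_goals
  · simp only [List.filter_cons, bne_self_eq_false, Bool.false_eq_true, if_false, List.length_cons]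
    exact Nat.lt_succ_of_le (List.length_filter_le _ _)

def resolve_cluster_type_py_alt (claims : List (List (String × String))) : String :=
  if claims = [] then "mixed"
  else pvBLoop (claims.map pvMapClaim) "" 0 false

-- ===== PRECONDITION & SPEC =====
def Spec_resolve_cluster_type_py (claims : List (List (String × String))) (out : String) : Prop := out = resolve_cluster_type_py_alt claims
instance (claims : List (List (String × String))) (out : String) : Decidable (Spec_resolve_cluster_type_py claims out) := by unfold Spec_resolve_cluster_type_py; infer_instance

-- ===== CLAIM (what is proved, stated in full; the proofs are below) =====
def Claim_equal_resolve_cluster_type_py : Prop := ∀ (claims : List (List (String × String))), Dom_resolve_cluster_type_py claims → Spec_resolve_cluster_type_py claims (resolve_cluster_type_py claims)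

-- ===== LEMMAS AND PROOFS =====

-- abstract view of B's loop: the distinct values of l in first-occurrence order with their counts
def pvItems (l : List String) : List (String × Int) :=
  (PySem.Set.ofList l).map (fun k => (k, (List.count k l : Nat)))

-- one step of the accumulator update Source B performs per distinct value
def pvStep (st : String × Int × Bool) (p : String × Int) : String × Int × Bool :=
  if st.2.1 < p.2 then (p.1, p.2, false)
  else if p.2 = st.2.1 then (st.1, st.2.1, true)
  else st

def pvRender (st : String × Int × Bool) : String := if st.2.2 then "mixed" else st.1

def pvMax (items : List (String × Int)) (bn : Int) : Int :=
  items.foldl (fun m p => max m p.2) bn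

-- Core fact about A: on any nonempty items list, A's look-at-the-top-two of the
-- count-sorted list agrees with a max-then-filter reading of the items.
theorem pv_core (items : List (String × Int)) (hne : items ≠ []) :
    (match (PySem.List.sorted items (fun p => p.2) true).take 2 with
      | (k0, v0) :: (_, v1) :: _ => if v0 = v1 then "mixed" else k0
      | (k0, _) :: [] => k0
      | [] => "") =
    (match (items.filter (fun p => p.2 == (PySem.List.max? (items.map (fun p => p.2)) (fun x => x)).getD 0)).map
        (fun p => p.1) with
      | [w] => w
      | _ => "mixed") := by
  rcases hs : PySem.List.sorted items (fun p => p.2) true with _ | ⟨h, t⟩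
  · exact absurd ((PySem.List.sorted_eq_nil_iff items (fun p => p.2) true).1 hs) hne
  have hperm : (h :: t).Perm items := hs ▸ PySem.List.sorted_perm items (fun p => p.2) true
  have hmemh : h ∈ items := hperm.mem_iff.1 (List.mem_cons_self)
  have hmax : ∀ y ∈ items, y.2 ≤ h.2 := PySem.List.key_head_sorted_rev_ge items (fun p => p.2) hs
  obtain ⟨m', hm'⟩ : ∃ m', PySem.List.max? (items.map (fun p => p.2)) (fun x => x) = some m' := by
    rcases hq : PySem.List.max? (items.map (fun p => p.2)) (fun x => x) with _ | m'
    · exact absurd (by simpa using (PySem.List.max?_eq_none_iff (items.map (fun p => p.2)) (fun x => x)).1 hq) hne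
    · exact ⟨m', hq⟩
  have hm : (PySem.List.max? (items.map (fun p => p.2)) (fun x => x)).getD 0 = h.2 := by
    rw [hm']
    obtain ⟨y, hy, hym⟩ := List.mem_map.1 (PySem.List.max?_mem hm')
    have h1 : m' ≤ h.2 := hym ▸ hmax y hy
    have h2 : h.2 ≤ m' := PySem.List.max?_isMax hm' _ (List.mem_map_of_mem hmemh)
    simpa using le_antisymm h1 h2
  rw [hm]
  rcases t with _ | ⟨h2, t2⟩
  · have hi : items = [h] := List.perm_singleton.1 hperm.symm
    subst hi
    simp
  · have hpw := hs ▸ PySem.List.sorted_pairwise_rev items (fun p => p.2)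
    rw [List.pairwise_cons] at hpw
    have h21 : h2.2 ≤ h.2 := hpw.1 h2 List.mem_cons_self
    by_cases htie : h.2 = h2.2
    · simp only [List.take]
      rw [if_pos htie]
      have hcnt : 2 ≤ (items.filter (fun p => p.2 == h.2)).length := by
        rw [← List.countP_eq_length_filter, ← hperm.countP_eq]
        simp only [List.countP_cons]
        have : (h2.2 == h.2) = true := by simp [htie.symm]
        simp [this]
      rcases hf : (items.filter (fun p => p.2 == h.2)).map (fun p => p.1) with _ | ⟨a, _ | ⟨b, l⟩⟩
      · simp [List.map_eq_nil_iff.1 hf] at hcnt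
      · have := congrArg List.length hf
        simp at this
        omega
      · rw [hf]
    · simp only [List.take]
      rw [if_neg htie]
      have hft : (h2 :: t2).filter (fun p => p.2 == h.2) = [] := by
        rw [List.filter_eq_nil_iff]
        intro y hy
        have : y.2 ≤ h2.2 := by
          rcases hy with _ | hy
          · exact le_refl _
          · exact (List.pairwise_cons.1 hpw.2).1 y (by assumption)
        simp only [beq_iff_eq]
        intro hcon
        exact htie (le_antisymm h21 (hcon ▸ this)).symm
      have hfs : (h :: h2 :: t2).filter (fun p => p.2 == h.2) = [h] := by
        simp [hft]
      have hfi : items.filter (fun p => p.2 == h.2) = [h] := by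
        have := (hperm.filter (fun p => p.2 == h.2))
        rw [hfs] at this
        exact List.perm_singleton.1 this.symm
      rw [hfi]
      rfl

-- ofList commutes with removing one value
theorem pv_ofList_filter (t : List String) (v : String) :
    PySem.Set.ofList (t.filter (fun x => x != v)) = (PySem.Set.ofList t).filter (fun y => !(y == v)) := by
  induction t with
  | nil => rfl
  | cons a t ih =>
    by_cases hav : a = v
    · subst hav
      simp only [List.filter_cons, bne_self_eq_false, Bool.false_eq_true, if_false, ih,
        PySem.Set.ofList_cons, PySem.Set.discard, List.filter_cons, beq_self_eq_true,
        Bool.not_true, Bool.false_eq_true, List.filter_filter, Bool.and_self]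
    · have hb : (a != v) = true := by simp [hav]
      simp only [List.filter_cons, hb, if_true, PySem.Set.ofList_cons, PySem.Set.discard, ih,
        List.filter_filter]
      have hh : (!(a == v)) = true := by simp [hav]
      simp only [hh, if_true]
      congr 1
      apply List.filter_congr
      intro x _
      exact Bool.and_comm _ _

-- unfolding one distinct value of pvItems
theorem pv_items_cons (v : String) (rest : List String) :
    pvItems (v :: rest) = (v, ((List.count v (v :: rest) : Nat) : Int)) :: pvItems (rest.filter (fun x => x != v)) := by
  unfold pvItems
  rw [PySem.Set.ofList_cons, List.map_cons, pv_ofList_filter]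
  congr 1
  show List.map _ ((PySem.Set.ofList rest).filter (fun y => !(y == v))) = _
  apply List.map_congr_left
  intro k hk
  have hkv : k ≠ v := by
    have := (List.mem_filter.1 hk).2
    simpa using this
  have hkr : k ∈ rest := (PySem.Set.mem_ofList _ _).1 (List.mem_filter.1 hk).1
  have h1 : List.count k (v :: rest) = List.count k rest := List.count_cons_of_ne (Ne.symm hkv)
  have h2 : List.count k (rest.filter (fun x => x != v)) = List.count k rest :=
    List.count_filter (by simp [hkv])
  rw [h1, ← h2]

-- facts about the running max of the item counts
theorem pv_max_le (items : List (String × Int)) (bn : Int) : bn ≤ pvMax items bn := by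
  induction items generalizing bn with
  | nil => exact le_refl _
  | cons p t ih => exact le_trans (le_max_left _ _) (ih (max bn p.2))

theorem pv_max_mem_le (items : List (String × Int)) (bn : Int) :
    ∀ p ∈ items, p.2 ≤ pvMax items bn := by
  induction items generalizing bn with
  | nil => intro p hp; cases hp
  | cons q t ih =>
    intro p hp
    rcases List.mem_cons.1 hp with rfl | hp'
    · exact le_trans (le_max_right _ _) (pv_max_le t (max bn p.2))
    · exact ih (max bn q.2) p hp'

theorem pv_max_cases (items : List (String × Int)) (bn : Int) :
    pvMax items bn = bn ∨ ∃ p ∈ items, p.2 = pvMax items bn := by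
  induction items generalizing bn with
  | nil => exact Or.inl rfl
  | cons q t ih =>
    have hMc : pvMax (q :: t) bn = pvMax t (max bn q.2) := rfl
    rcases ih (max bn q.2) with h | ⟨p, hp, hp2⟩
    · rcases le_total q.2 bn with hle | hle
      · exact Or.inl (by rw [hMc, h, max_eq_left hle])
      · exact Or.inr ⟨q, List.mem_cons_self, by rw [hMc, h, max_eq_right hle]⟩
    · exact Or.inr ⟨p, List.mem_cons_of_mem _ hp, by rw [hMc]; exact hp2⟩

theorem pv_max_of_all_le (items : List (String × Int)) (bn : Int)
    (h : ∀ p ∈ items, p.2 ≤ bn) : pvMax items bn = bn := by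
  induction items generalizing bn with
  | nil => rfl
  | cons q t ih =>
    have hMc : pvMax (q :: t) bn = pvMax t (max bn q.2) := rfl
    rw [hMc, max_eq_left (h q List.mem_cons_self)]
    exact ih bn (fun p hp => h p (List.mem_cons_of_mem _ hp))

-- closed form of folding Source B's accumulator update over an items list
theorem pv_fold_char (items : List (String × Int)) (b : String) (bn : Int) (tie : Bool) :
    List.foldl pvStep (b, bn, tie) items =
      ( cond (items.any (fun p => decide (bn < p.2)))
          (((items.find? (fun p => p.2 == pvMax items bn)).map Prod.fst).getD b) b,
        pvMax items bn,
        cond (items.any (fun p => decide (bn < p.2)))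
          (decide (2 ≤ items.countP (fun p => p.2 == pvMax items bn)))
          (tie || items.any (fun p => p.2 == bn)) ) := by
  induction items generalizing b bn tie with
  | nil => simp [pvMax]
  | cons p t ih =>
    obtain ⟨v, n⟩ := p
    have hM : pvMax ((v, n) :: t) bn = pvMax t (max bn n) := rfl
    rw [List.foldl_cons]
    by_cases h1 : bn < n
    · have hanyl : (((v, n) :: t).any (fun p => decide (bn < p.2))) = true := by
        simp [List.any_cons, h1]
      have hstep : pvStep (b, bn, tie) (v, n) = (v, n, false) := by
        simp only [pvStep]; rw [if_pos h1]
      rw [hstep, ih]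
      simp only [hM, max_eq_right h1.le, hanyl, Bool.cond_true]
      by_cases h3 : t.any (fun p => decide (n < p.2)) = true
      · have hMgt : n < pvMax t n := by
          obtain ⟨q, hq, hq2⟩ := List.any_eq_true.1 h3
          exact lt_of_lt_of_le (of_decide_eq_true hq2) (pv_max_mem_le t n q hq)
        have hpredv : ((v, n).2 == pvMax t n) = false := by simp; omega
        obtain ⟨w, hw⟩ : ∃ w, t.find? (fun p => p.2 == pvMax t n) = some w := by
          rcases pv_max_cases t n with h | ⟨q, hq, hq2⟩
          · omega
          · exact Option.isSome_iff_exists.1 (List.find?_isSome.2 ⟨q, hq, by simp [hq2]⟩)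
        simp only [h3, Bool.cond_true]
        rw [List.find?_cons_of_neg (p := fun (p : String × Int) => p.2 == pvMax t n) (ne_true_of_eq_false hpredv), hw]
        simp only [List.countP_cons, Option.map_some, Option.getD_some]
        simp [hpredv]
      · have h3' : (t.any (fun p => decide (n < p.2))) = false := by simpa using h3
        have hall : ∀ p ∈ t, p.2 ≤ n := by
          intro p hp
          by_contra hc
          exact h3 (List.any_eq_true.2 ⟨p, hp, decide_eq_true (lt_of_not_ge hc)⟩)
        have hMn : pvMax t n = n := pv_max_of_all_le t n hall
        simp only [h3', Bool.cond_false, hMn]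
        have hpredv : ((v, n).2 == n) = true := by simp
        rw [List.find?_cons_of_pos (p := fun (p : String × Int) => p.2 == n) hpredv]
        simp only [List.countP_cons, hpredv, if_true, Option.map_some, Option.getD_some, Bool.false_or]
        have hb : (t.any (fun p => p.2 == n)) = decide (2 ≤ List.countP (fun p => p.2 == n) t + 1) := by
          cases hb : t.any (fun p => p.2 == n) with
          | true =>
            obtain ⟨q, hq, hq2⟩ := List.any_eq_true.1 hb
            have : 0 < t.countP (fun p => p.2 == n) := List.countP_pos_iff.2 ⟨q, hq, hq2⟩
            exact (decide_eq_true (by omega)).symm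
          | false =>
            have h0 : t.countP (fun p => p.2 == n) = 0 :=
              List.countP_eq_zero.2 (fun q hq => List.any_eq_false.mp hb q hq)
            exact (decide_eq_false (by omega)).symm
        rw [hb]
    · have hanyl : (((v, n) :: t).any (fun p => decide (bn < p.2))) = (t.any (fun p => decide (bn < p.2))) := by
        simp [List.any_cons, h1]
      by_cases h2 : n = bn
      · subst h2
        have hstep : pvStep (b, n, tie) (v, n) = (b, n, true) := by
          simp only [pvStep]; rw [if_neg h1]; simp
        rw [hstep, ih]
        simp only [hM, max_self, hanyl]
        by_cases h3 : t.any (fun p => decide (n < p.2)) = true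
        · have hMgt : n < pvMax t n := by
            obtain ⟨q, hq, hq2⟩ := List.any_eq_true.1 h3
            exact lt_of_lt_of_le (of_decide_eq_true hq2) (pv_max_mem_le t n q hq)
          have hpredv : ((v, n).2 == pvMax t n) = false := by simp; omega
          simp only [h3, Bool.cond_true]
          rw [List.find?_cons_of_neg (p := fun (p : String × Int) => p.2 == pvMax t n) (ne_true_of_eq_false hpredv)]
          simp [hpredv]
        · have h3' : (t.any (fun p => decide (n < p.2))) = false := by simpa using h3
          have hall : ∀ p ∈ t, p.2 ≤ n := by
            intro p hp
            by_contra hc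
            exact h3 (List.any_eq_true.2 ⟨p, hp, decide_eq_true (lt_of_not_ge hc)⟩)
          have hMn : pvMax t n = n := pv_max_of_all_le t n hall
          simp only [h3', Bool.cond_false, hMn]
          have hhd : (((v, n) :: t).any (fun p => p.2 == n)) = true := by
            simp [List.any_cons]
          rw [hhd]
          simp
      · have hstep : pvStep (b, bn, tie) (v, n) = (b, bn, tie) := by
          simp only [pvStep]; rw [if_neg h1, if_neg h2]
        rw [hstep, ih]
        simp only [hM, max_eq_left (not_lt.1 h1), hanyl]
        by_cases h3 : t.any (fun p => decide (bn < p.2)) = true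
        · have hMgt : bn < pvMax t bn := by
            obtain ⟨q, hq, hq2⟩ := List.any_eq_true.1 h3
            exact lt_of_lt_of_le (of_decide_eq_true hq2) (pv_max_mem_le t bn q hq)
          have hn : n ≤ bn := not_lt.1 h1
          have hpredv : ((v, n).2 == pvMax t bn) = false := by simp; omega
          simp only [h3, Bool.cond_true]
          rw [List.find?_cons_of_neg (p := fun (p : String × Int) => p.2 == pvMax t bn) (ne_true_of_eq_false hpredv)]
          simp [hpredv]
        · have h3' : (t.any (fun p => decide (bn < p.2))) = false := by simpa using h3
          simp only [h3', Bool.cond_false]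
          have hhd : (((v, n) :: t).any (fun p => p.2 == bn)) = (t.any (fun p => p.2 == bn)) := by
            simp [List.any_cons, h2]
          rw [hhd]

-- Source B's loop is the fold of its accumulator update over the distinct values with counts
theorem pv_bloop_eq_fold (l : List String) (b : String) (bn : Int) (tie : Bool) :
    pvBLoop l b bn tie = pvRender (List.foldl pvStep (b, bn, tie) (pvItems l)) := by
  have H : ∀ (m : Nat) (l : List String), l.length = m → ∀ (b : String) (bn : Int) (tie : Bool),
      pvBLoop l b bn tie = pvRender (List.foldl pvStep (b, bn, tie) (pvItems l)) := by
    intro m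
    induction m using Nat.strong_induction_on with
    | _ m ih =>
      intro l hlen b0 bn0 tie0
      match l with
      | [] => rw [pvBLoop]; rfl
      | v :: rest =>
        have hfeq : (v :: rest).filter (fun x => x != v) = rest.filter (fun x => x != v) := by
          simp
        have hlt : (rest.filter (fun x => x != v)).length < m := by
          rw [← hlen]
          exact Nat.lt_succ_of_le (List.length_filter_le _ _)
        have hrec := ih _ hlt (rest.filter (fun x => x != v)) rfl
        rw [pvBLoop, pv_items_cons, List.foldl_cons, PySem.List.count_eq]
        by_cases h1 : bn0 < ((List.count v (v :: rest) : Nat) : Int)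
        · rw [if_pos h1, hfeq, hrec]
          have hst : pvStep (b0, bn0, tie0) (v, ((List.count v (v :: rest) : Nat) : Int))
              = (v, ((List.count v (v :: rest) : Nat) : Int), false) := by
            simp only [pvStep]; rw [if_pos h1]
          rw [hst]
        · rw [if_neg h1]
          by_cases h2 : ((List.count v (v :: rest) : Nat) : Int) = bn0
          · rw [if_pos h2, hfeq, hrec]
            have hst : pvStep (b0, bn0, tie0) (v, ((List.count v (v :: rest) : Nat) : Int))
                = (b0, bn0, true) := by
              simp only [pvStep]; rw [if_neg h1, if_pos h2]
            rw [hst]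
          · rw [if_neg h2, hfeq, hrec]
            have hst : pvStep (b0, bn0, tie0) (v, ((List.count v (v :: rest) : Nat) : Int))
                = (b0, bn0, tie0) := by
              simp only [pvStep]; rw [if_neg h1, if_neg h2]
            rw [hst]
  exact H l.length l rfl b bn tie

-- B's side equals the max-then-filter reading of the items
theorem pv_altside (l : List String) (hne : l ≠ []) :
    pvBLoop l "" 0 false =
    (match ((pvItems l).filter (fun p => p.2 == (PySem.List.max? ((pvItems l).map (fun p => p.2)) (fun x => x)).getD 0)).map
        (fun p => p.1) with
      | [w] => w
      | _ => "mixed") := by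
  rw [pv_bloop_eq_fold, pv_fold_char]
  have hitems : pvItems l ≠ [] := by
    obtain ⟨a, ha⟩ := List.exists_mem_of_ne_nil _ hne
    exact List.ne_nil_of_mem (List.mem_map_of_mem ((PySem.Set.mem_ofList _ _).2 ha))
  have hpos : ∀ p ∈ pvItems l, 1 ≤ p.2 := by
    intro p hp
    obtain ⟨k, hk, hkp⟩ := List.mem_map.1 hp
    have hkl : k ∈ l := (PySem.Set.mem_ofList _ _).1 hk
    have hc : 0 < List.count k l := List.count_pos_iff.2 hkl
    rw [← hkp]
    show (1 : Int) ≤ ((List.count k l : Nat) : Int)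
    exact_mod_cast hc
  obtain ⟨p0, hp0⟩ := List.exists_mem_of_ne_nil _ hitems
  have hany : ((pvItems l).any (fun p => decide ((0 : Int) < p.2))) = true :=
    List.any_eq_true.2 ⟨p0, hp0, decide_eq_true (by have := hpos p0 hp0; omega)⟩
  have hMpos : (1 : Int) ≤ pvMax (pvItems l) 0 :=
    le_trans (hpos p0 hp0) (pv_max_mem_le _ 0 p0 hp0)
  obtain ⟨pM, hpM, hpM2⟩ : ∃ p ∈ pvItems l, p.2 = pvMax (pvItems l) 0 := by
    rcases pv_max_cases (pvItems l) 0 with h | h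
    · omega
    · exact h
  obtain ⟨m', hm'⟩ : ∃ m', PySem.List.max? ((pvItems l).map (fun p => p.2)) (fun x => x) = some m' := by
    rcases hq : PySem.List.max? ((pvItems l).map (fun p => p.2)) (fun x => x) with _ | m'
    · exact absurd (by simpa using (PySem.List.max?_eq_none_iff ((pvItems l).map (fun p => p.2)) (fun x => x)).1 hq) hitems
    · exact ⟨m', hq⟩
  have hmM : (PySem.List.max? ((pvItems l).map (fun p => p.2)) (fun x => x)).getD 0 = pvMax (pvItems l) 0 := by
    rw [hm']
    obtain ⟨y, hy, hym⟩ := List.mem_map.1 (PySem.List.max?_mem hm')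
    have h1 : m' ≤ pvMax (pvItems l) 0 := hym ▸ pv_max_mem_le _ 0 y hy
    have h2 : pvMax (pvItems l) 0 ≤ m' := by
      have := PySem.List.max?_isMax hm' pM.2 (List.mem_map_of_mem hpM)
      simpa [hpM2] using this
    simpa using le_antisymm h1 h2
  rw [hmM, hany, Bool.cond_true, Bool.cond_true]
  unfold pvRender
  rcases hf : (pvItems l).filter (fun p => p.2 == pvMax (pvItems l) 0) with _ | ⟨w, _ | ⟨w2, ws⟩⟩
  · have hmem : pM ∈ List.filter (fun p => p.2 == pvMax (pvItems l) 0) (pvItems l) :=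
      List.mem_filter.2 ⟨hpM, by simp [hpM2]⟩
    rw [hf] at hmem
    cases hmem
  · have hc : (pvItems l).countP (fun p => p.2 == pvMax (pvItems l) 0) = 1 := by
      rw [List.countP_eq_length_filter, hf]; rfl
    have hfind : (pvItems l).find? (fun p => p.2 == pvMax (pvItems l) 0) = some w := by
      rw [← List.head?_filter, hf]; rfl
    rw [hf, hfind]
    simp [hc]
  · have hc : 2 ≤ (pvItems l).countP (fun p => p.2 == pvMax (pvItems l) 0) := by
      rw [List.countP_eq_length_filter, hf]
      simp
    rw [hf]
    simp [decide_eq_true hc]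

-- ===== VERDICT (by name: the statement is the Claim_ definition above) =====
theorem resolve_cluster_type_py_spec : Claim_equal_resolve_cluster_type_py := by
  intro claims _
  unfold Spec_resolve_cluster_type_py resolve_cluster_type_py resolve_cluster_type_py_alt
  by_cases hc : claims = []
  · simp [hc]
  · simp only [if_neg hc]
    have hm : claims.map pvMapClaim ≠ [] := by simpa using hc
    have hitems : (PySem.Dict.counter (claims.map pvMapClaim)).items ≠ [] := by
      rw [PySem.Dict.items_counter]
      obtain ⟨a, ha⟩ := List.exists_mem_of_ne_nil _ hm
      exact List.ne_nil_of_mem (List.mem_map_of_mem ((PySem.Set.mem_ofList _ _).2 ha))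
    have hAB := pv_core (PySem.Dict.counter (claims.map pvMapClaim)).items hitems
    rw [hAB, pv_altside (claims.map pvMapClaim) hm]
    have : (PySem.Dict.counter (claims.map pvMapClaim)).items = pvItems (claims.map pvMapClaim) := by
      rw [PySem.Dict.items_counter]; rfl
    rw [this]
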